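-- pv_equiv track=rewrite | github.com/JakeConal/computer-system-reverse-project | keygen/file-2.py | convert
-- ===== SOURCE A (Python) =====
-- def get_hash(ch: str, shift: int) -> int:
--     # Find the original index of the character in the HASHMAP
--     original_index = HASHMAP.index(ch)
--
--     # Calculate the new index based on the shift (simulating rotation)
--     rotated_index = (original_index - shift * 6) % len(HASHMAP)
--
--     return rotated_index
--
-- def convert(arr, shift):
--     esp_10 = 0  # Simulate [esp+10]
--
--     for ch in reversed(arr):  # â† RIGHT TO LEFT!
--         if ch not in HASHMAP:
--             raise ValueError(f"Character {ch} not found in rotated HASHMAP.")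
--
--         ecx = get_hash(ch,shift)            # Step 0: index of character
--         edx = esp_10                        # Step 1: load current [esp+10]
--         edx = edx * 9                       # Step 2: edx = edx * 9
--         ecx = ecx + edx * 4                 # Step 3: ecx = ecx + edx * 4
--         esp_10 = ecx                        # Step 4: write back to [esp+10]
--
--     return esp_10
--
-- HASHMAP = [
--     'A', 'G', 'M', 'S', 'Y', '4', 'B', 'H',
--     'N', 'T', 'Z', '5', 'C', 'I', 'O', 'U',
--     '0', '6', 'D', 'J', 'P', 'V', '1', '7',
--     'E', 'K', 'Q', 'W', '2', '8', 'F', 'L',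
--     'R', 'X', '3', '9'
-- ]
-- ===== SOURCE B (Python) =====
-- # B: forward left-to-right pass with a precomputed dict index and positional
-- # powers of 36 (A scans reversed(arr) with list.index and a *9*4 Horner accumulator).
-- HASHMAP = [
--     'A', 'G', 'M', 'S', 'Y', '4', 'B', 'H',
--     'N', 'T', 'Z', '5', 'C', 'I', 'O', 'U',
--     '0', '6', 'D', 'J', 'P', 'V', '1', '7',
--     'E', 'K', 'Q', 'W', '2', '8', 'F', 'L',
--     'R', 'X', '3', '9'
-- ]
--
-- _IDX = {ch: i for i, ch in enumerate(HASHMAP)}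
--
-- def _digit(ch, shift):
--     try:
--         i = _IDX[ch]
--     except KeyError:
--         raise ValueError(f"Character {ch} not found in rotated HASHMAP.")
--     return (i - shift * 6) % 36
--
-- def convert(arr, shift):
--     return sum(_digit(ch, shift) * 36 ** k for k, ch in enumerate(arr))
-- ===== Notes on version B (the rewrite author's own statement) =====
-- stated objective: alternative
-- what changed: Replaced A's reversed right-to-left scan with a running *9*4 Horner accumulator and repeated HASHMAP.index list scans by a forward left-to-right pass over a precomputed char->index dict, summing digit*36**position terms.
import Mathlib
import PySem

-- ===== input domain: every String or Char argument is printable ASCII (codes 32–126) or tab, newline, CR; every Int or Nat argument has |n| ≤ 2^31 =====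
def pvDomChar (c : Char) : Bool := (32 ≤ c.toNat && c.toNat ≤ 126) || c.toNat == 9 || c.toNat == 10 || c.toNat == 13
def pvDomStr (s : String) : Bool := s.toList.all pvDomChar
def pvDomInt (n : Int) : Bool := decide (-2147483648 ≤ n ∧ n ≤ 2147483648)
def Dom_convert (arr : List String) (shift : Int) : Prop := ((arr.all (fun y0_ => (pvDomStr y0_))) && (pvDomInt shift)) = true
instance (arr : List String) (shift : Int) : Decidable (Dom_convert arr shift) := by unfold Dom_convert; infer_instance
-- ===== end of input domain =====

-- B replaces A's reversed-scan Horner accumulator with a forward pass over a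
-- precomputed dict index summing positional powers of 36 (objective: alternative).

-- ===== PORT A =====
def pyHashmap : List String :=
  ["A", "G", "M", "S", "Y", "4", "B", "H",
   "N", "T", "Z", "5", "C", "I", "O", "U",
   "0", "6", "D", "J", "P", "V", "1", "7",
   "E", "K", "Q", "W", "2", "8", "F", "L",
   "R", "X", "3", "9"]

-- get_hash: HASHMAP.index(ch), then (i - shift*6) % 36; the index-miss ValueError
-- path (none) is unreachable from convert, which checks membership first.
def getHash (ch : String) (shift : Int) : Int :=
  match PySem.List.index? pyHashmap ch with
  | some i => PySem.Int.mod ((i : Int) - shift * 6) 36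
  | none => 0

def convert (arr : List String) (shift : Int) : Int :=
  arr.reverse.foldl (fun esp10 ch =>
    if ch ∈ pyHashmap then
      let ecx := getHash ch shift       -- Step 0
      let edx := esp10 * 9              -- Steps 1–2
      ecx + edx * 4                     -- Step 3
    else 0                              -- raise ValueError: excluded by Pre_
    ) 0

-- ===== PORT B =====
def bIdx : PySem.Dict String Int :=
  PySem.Dict.ofList ((PySem.List.enumerate pyHashmap 0).map (fun p => (p.2, p.1)))

def bDigit (ch : String) (shift : Int) : Int :=
  match bIdx.get? ch with
  | some i => PySem.Int.mod (i - shift * 6) 36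
  | none => 0                           -- raise ValueError: excluded by Pre_

def convert_alt (arr : List String) (shift : Int) : Int :=
  ((PySem.List.enumerate arr 0).map (fun p => bDigit p.2 shift * 36 ^ p.1.toNat)).sum

-- ===== PRECONDITION & SPEC =====
-- Pre_ excludes exactly the inputs with a character outside HASHMAP, on which A raises ValueError.
def Pre_convert (arr : List String) (shift : Int) : Prop :=
  ∀ s ∈ arr, s ∈ pyHashmap
instance (arr : List String) (shift : Int) : Decidable (Pre_convert arr shift) := by unfold Pre_convert; infer_instance

def pvWitness_convert : List String × Int := (["A", "9", "Z"], 3)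

def Spec_convert (arr : List String) (shift : Int) (out : Int) : Prop := out = convert_alt arr shift
instance (arr : List String) (shift : Int) (out : Int) : Decidable (Spec_convert arr shift out) := by unfold Spec_convert; infer_instance

-- ===== CLAIM (what is proved, stated in full; the proofs are below) =====
def Claim_equal_convert : Prop := ∀ (arr : List String) (shift : Int), Dom_convert arr shift → Pre_convert arr shift → Spec_convert arr shift (convert arr shift)

-- ===== LEMMAS AND PROOFS =====

-- the dict lookup of B agrees with the list index of A on every member of HASHMAP
set_option maxRecDepth 8192 in
theorem bIdx_eq_index (ch : String) (h : ch ∈ pyHashmap) :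
    bIdx.get? ch = (PySem.List.index? pyHashmap ch).map (fun n => (n : Int)) := by
  fin_cases h <;> decide

theorem bDigit_eq_getHash (ch : String) (shift : Int) (h : ch ∈ pyHashmap) :
    bDigit ch shift = getHash ch shift := by
  unfold bDigit getHash
  rw [bIdx_eq_index ch h]
  rcases hi : PySem.List.index? pyHashmap ch with _ | i
  · simp at hi; exact absurd h hi
  · simp

-- shifting the start index of enumerate multiplies each power-of-36 term by 36
theorem sum_enumerate_shift (l : List String) (shift : Int) (s : Int) (hs : 0 ≤ s) :
    ((PySem.List.enumerate l (s + 1)).map (fun p => bDigit p.2 shift * 36 ^ p.1.toNat)).sum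
      = 36 * ((PySem.List.enumerate l s).map (fun p => bDigit p.2 shift * 36 ^ p.1.toNat)).sum := by
  induction l generalizing s with
  | nil => simp [PySem.List.enumerate_nil]
  | cons a t ih =>
    rw [PySem.List.enumerate_cons, PySem.List.enumerate_cons]
    simp only [List.map_cons, List.sum_cons]
    rw [ih (s + 1) (by omega)]
    have : (s + 1).toNat = s.toNat + 1 := by omega
    rw [this, pow_succ]
    ring

theorem convert_alt_cons (a : String) (t : List String) (shift : Int) :
    convert_alt (a :: t) shift = bDigit a shift + 36 * convert_alt t shift := by
  unfold convert_alt
  rw [PySem.List.enumerate_cons]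
  simp only [List.map_cons, List.sum_cons]
  rw [show (0 : Int) + 1 = 0 + 1 from rfl, sum_enumerate_shift t shift 0 le_rfl]
  norm_num

theorem convert_cons (a : String) (t : List String) (shift : Int) (h : a ∈ pyHashmap) :
    convert (a :: t) shift = getHash a shift + convert t shift * 9 * 4 := by
  unfold convert
  rw [List.reverse_cons, List.foldl_append]
  simp [h]

theorem convert_eq_alt (arr : List String) (shift : Int) (hp : ∀ s ∈ arr, s ∈ pyHashmap) :
    convert arr shift = convert_alt arr shift := by
  induction arr with
  | nil => simp [convert, convert_alt, PySem.List.enumerate_nil]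
  | cons a t ih =>
    have ha : a ∈ pyHashmap := hp a (by simp)
    rw [convert_cons a t shift ha, convert_alt_cons,
        ih (fun s hs => hp s (by simp [hs])), bDigit_eq_getHash a shift ha]
    ring

-- ===== VERDICT (by name: the statement is the Claim_ definition above) =====
theorem convert_spec : Claim_equal_convert := by
  intro arr shift _ hpre
  unfold Spec_convert
  exact convert_eq_alt arr shift hpre
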